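-- pv_equiv track=rewrite | github.com/Alexandregirbal/Maths-D | enum.py | enumDoublets
-- ===== SOURCE A (Python) =====
-- def liste2(liste):
--     listeResultat=[]
--     n = len(liste)
--     for i in range(1,n+1,1):
--         for j in range(i+1,n+1,1):
--             listeResultat.append([liste[i-1],liste[j-1]])
--     return listeResultat
--
-- def enumDoublets(doublet,dbt,elements,enum):
--
--     if (doublet < 0):
--         return ([])
--
--     elif doublet>0 :
--         d = doublet-1
--         perm = liste2(elements)
--         borne = len(perm)//doublet
--         for j in range(borne):
--             tmp = [l for l in dbt]
--             tmp.append(perm[j])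
--             diff = [k for k in elements]
--             diff.remove(perm[j][0])
--             diff.remove(perm[j][1])
--
--             enumDoublets(d,tmp,diff,enum)
--
--     elif (doublet==0):
--         enum.append(dbt)
--
--     return (enum)
-- ===== SOURCE B (Python) =====
-- def allPairs(els):
--     if not els:
--         return []
--     return [[els[0], y] for y in els[1:]] + allPairs(els[1:])
--
-- def enumDoublets(doublet, dbt, elements, enum):
--     if doublet < 0:
--         return []
--     frames = [(dbt, elements)]
--     d = doublet
--     while d > 0 and frames:
--         nxt = []
--         for cur, els in frames:
--             prs = allPairs(els)
--             for p in prs[:len(prs) // d]: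
--                 rest = list(els)
--                 rest.remove(p[0])
--                 rest.remove(p[1])
--                 nxt.append((cur + [p], rest))
--         frames = nxt
--         d -= 1
--     for cur, _ in frames:
--         enum.append(cur)
--     return enum
-- ===== Notes on version B (the rewrite author's own statement) =====
-- stated objective: alternative
-- what changed: Replaces A's depth-first recursion (which threads the enum accumulator through recursive calls and an index loop over liste2's nested index loops) by an iterative breadth-first level-by-level expansion of a frame list with a head/tail-recursive pair generator; no recursion on doublet remains.
import Mathlib
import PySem

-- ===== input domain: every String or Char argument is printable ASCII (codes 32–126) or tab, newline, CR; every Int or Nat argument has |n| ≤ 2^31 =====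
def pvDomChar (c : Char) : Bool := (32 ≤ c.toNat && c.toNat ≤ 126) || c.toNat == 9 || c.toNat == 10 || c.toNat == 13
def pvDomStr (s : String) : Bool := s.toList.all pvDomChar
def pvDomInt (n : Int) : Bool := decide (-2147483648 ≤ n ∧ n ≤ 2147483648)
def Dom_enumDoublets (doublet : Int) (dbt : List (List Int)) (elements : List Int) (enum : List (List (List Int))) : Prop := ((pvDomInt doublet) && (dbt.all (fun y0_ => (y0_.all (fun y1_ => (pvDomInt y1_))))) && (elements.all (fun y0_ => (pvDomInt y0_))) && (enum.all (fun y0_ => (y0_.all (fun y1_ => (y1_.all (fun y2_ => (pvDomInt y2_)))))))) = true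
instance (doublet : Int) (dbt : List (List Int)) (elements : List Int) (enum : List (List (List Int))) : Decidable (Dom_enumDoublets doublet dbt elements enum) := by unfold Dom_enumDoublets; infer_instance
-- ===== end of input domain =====

-- B replaces A's depth-first recursion (threading the `enum` accumulator through recursive calls)
-- by a breadth-first level-by-level expansion of a frame list (objective: alternative, same cost).
-- Side effects: A mutates `enum` in place; equivalence proved here is about the RETURN value
-- (B appends the same items to `enum`, so the observable mutation agrees as well when doublet ≥ 0).

-- ===== PORT A =====
-- liste2: nested index loops i in range(1,n+1), j in range(i+1,n+1); the indices i-1, j-1 are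
-- always in range, so the pyGetD default 0 is unreachable.
def pvListe2 (liste : List Int) : List (List Int) :=
  let n : Int := liste.length
  (PySem.List.pyRange 1 (n+1) 1).foldl (fun acc i =>
    (PySem.List.pyRange (i+1) (n+1) 1).foldl (fun acc2 j =>
      acc2 ++ [[PySem.List.pyGetD liste (i-1) 0, PySem.List.pyGetD liste (j-1) 0]]) acc) []

-- A's recursion; `list.remove` always succeeds here (both pair members come from `elements`,
-- at distinct positions), so the `.getD` fallback of remove? is unreachable.
def enumDoublets (doublet : Int) (dbt : List (List Int)) (elements : List Int) (enum : List (List (List Int))) : List (List (List Int)) :=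
  if doublet < 0 then []
  else if doublet > 0 then
    let d := doublet - 1
    let perm := pvListe2 elements
    let borne := PySem.Int.floordiv (perm.length : Int) doublet
    (PySem.List.pyRange 0 borne 1).foldl (fun en j =>
      let pj := PySem.List.pyGetD perm j []
      let tmp := dbt ++ [pj]
      let diff := elements
      let diff := (PySem.List.remove? diff (PySem.List.pyGetD pj 0 0)).getD diff
      let diff := (PySem.List.remove? diff (PySem.List.pyGetD pj 1 0)).getD diff
      enumDoublets d tmp diff en) enum
  else enum ++ [dbt]
termination_by doublet.toNat
decreasing_by omega

-- ===== PORT B =====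
-- all unordered pairs, head/tail recursion (B's allPairs)
def pvAllPairs (els : List Int) : List (List Int) :=
  match els with
  | [] => []
  | x :: rest => rest.map (fun y => [x, y]) ++ pvAllPairs rest

-- breadth-first worklist: expand the frame list once per level d = doublet, …, 1,
-- stopping early when no frames remain, then append the fronts
def pvLevels (d : Int) (frames : List (List (List Int) × List Int)) : List (List (List Int) × List Int) :=
  if d > 0 ∧ frames ≠ [] then
    pvLevels (d - 1)
      (frames.foldl (fun nxt fr =>
        let prs := pvAllPairs fr.2
        (PySem.List.slice prs none (some (PySem.Int.floordiv (prs.length : Int) d))).foldl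
          (fun nxt p =>
            let rest := (PySem.List.remove? fr.2 (PySem.List.pyGetD p 0 0)).getD fr.2
            let rest := (PySem.List.remove? rest (PySem.List.pyGetD p 1 0)).getD rest
            nxt ++ [(fr.1 ++ [p], rest)]) nxt) [])
  else frames
termination_by d.toNat
decreasing_by omega

def enumDoublets_alt (doublet : Int) (dbt : List (List Int)) (elements : List Int) (enum : List (List (List Int))) : List (List (List Int)) :=
  if doublet < 0 then []
  else (pvLevels doublet [(dbt, elements)]).foldl (fun en fr => en ++ [fr.1]) enum

-- ===== PRECONDITION & SPEC =====
def Spec_enumDoublets (doublet : Int) (dbt : List (List Int)) (elements : List Int) (enum : List (List (List Int))) (out : List (List (List Int))) : Prop := out = enumDoublets_alt doublet dbt elements enum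
instance (doublet : Int) (dbt : List (List Int)) (elements : List Int) (enum : List (List (List Int))) (out : List (List (List Int))) : Decidable (Spec_enumDoublets doublet dbt elements enum out) := by unfold Spec_enumDoublets; infer_instance

-- ===== CLAIM (what is proved, stated in full; the proofs are below) =====
def Claim_equal_enumDoublets : Prop := ∀ (doublet : Int) (dbt : List (List Int)) (elements : List Int) (enum : List (List (List Int))), Dom_enumDoublets doublet dbt elements enum → Spec_enumDoublets doublet dbt elements enum (enumDoublets doublet dbt elements enum)

-- ===== LEMMAS AND PROOFS =====

def pvRm2 (els : List Int) (p : List Int) : List Int :=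
  let r1 := (PySem.List.remove? els (PySem.List.pyGetD p 0 0)).getD els
  (PySem.List.remove? r1 (PySem.List.pyGetD p 1 0)).getD r1

-- the child frames of one frame at level d

def pvChilds (d : Nat) (dbt : List (List Int)) (els : List Int) : List (List (List Int) × List Int) :=
  ((pvAllPairs els).take ((pvAllPairs els).length / d)).map (fun p => (dbt ++ [p], pvRm2 els p))

-- the list of completed doublet lists produced below one frame

def pvGen : Nat → List (List Int) → List Int → List (List (List Int))
  | 0, dbt, _ => [dbt]
  | k+1, dbt, els => (pvChilds (k+1) dbt els).flatMap (fun fr => pvGen k fr.1 fr.2)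

theorem pvMap_range_getD {α β : Type} (xs : List α) (d : α) (f : α → β) :
    (List.range xs.length).map (fun k => f (xs.getD k d)) = xs.map f := by
  apply List.ext_getElem (by simp)
  intro i h1 h2
  have hi : i < xs.length := by simpa using h2
  simp [List.getD_eq_getElem?_getD, List.getElem?_eq_getElem hi]

theorem pvListe2_flat (l : List Int) :
    pvListe2 l = (PySem.List.pyRange 1 ((l.length : Int)+1) 1).flatMap (fun i =>
      (PySem.List.pyRange (i+1) ((l.length : Int)+1) 1).map (fun j =>
        [PySem.List.pyGetD l (i-1) 0, PySem.List.pyGetD l (j-1) 0])) := by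
  unfold pvListe2
  rw [PySem.List.foldl_congr_mem _ _
    (fun acc i => acc ++ (PySem.List.pyRange (i+1) ((l.length : Int)+1) 1).map (fun j =>
        [PySem.List.pyGetD l (i-1) 0, PySem.List.pyGetD l (j-1) 0])) []
    (by
      intro acc i _
      beta_reduce
      rw [PySem.List.foldl_append_singleton_eq_map])]
  rw [PySem.List.foldl_append_eq_flatMap]
  rfl

theorem pvAllPairs_flat (l : List Int) :
    pvAllPairs l = (PySem.List.pyRange 1 ((l.length : Int)+1) 1).flatMap (fun i =>
      (PySem.List.pyRange (i+1) ((l.length : Int)+1) 1).map (fun j =>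
        [PySem.List.pyGetD l (i-1) 0, PySem.List.pyGetD l (j-1) 0])) := by
  induction l with
  | nil =>
      rw [PySem.List.pyRange_one_eq_nil (by norm_num)]
      rfl
  | cons x xs ih =>
      have hn : ((List.length (x :: xs) : Int) + 1) = (xs.length : Int) + 2 := by
        simp; ring
      rw [hn, PySem.List.pyRange_one_cons (by omega)]
      simp only [List.flatMap_cons]
      have hfirst : (PySem.List.pyRange (1+1) ((xs.length : Int)+2) 1).map (fun j =>
          [PySem.List.pyGetD (x :: xs) (1-1) 0, PySem.List.pyGetD (x :: xs) (j-1) 0])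
          = xs.map (fun y => [x, y]) := by
        rw [PySem.List.pyRange_one]
        have ht : (((xs.length : Int)+2) - (1+1)).toNat = xs.length := by omega
        rw [ht, List.map_map]
        have : ∀ k ∈ List.range xs.length,
            ((fun j => [PySem.List.pyGetD (x :: xs) (1-1) 0, PySem.List.pyGetD (x :: xs) (j-1) 0]) ∘ (fun k : Nat => (1+1 : Int) + k)) k
            = (fun k : Nat => [x, xs.getD k 0]) k := by
          intro k _
          simp only [Function.comp_apply]
          have h1 : (1+1 : Int) + (k : Int) - 1 = ((k+1 : Nat) : Int) := by push_cast; ring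
          have h2 : ((1:Int)-1) = ((0 : Nat) : Int) := by norm_num
          rw [h1, h2, PySem.List.pyGetD_natCast, PySem.List.pyGetD_natCast]
          simp
        rw [List.map_congr_left this]
        rw [← pvMap_range_getD xs 0 (fun y => [x, y])]
      have hrest : (PySem.List.pyRange (1+1) ((xs.length : Int)+2) 1).flatMap (fun i =>
          (PySem.List.pyRange (i+1) ((xs.length : Int)+2) 1).map (fun j =>
            [PySem.List.pyGetD (x :: xs) (i-1) 0, PySem.List.pyGetD (x :: xs) (j-1) 0]))
          = pvAllPairs xs := by
        rw [ih]
        rw [PySem.List.pyRange_one (1+1), PySem.List.pyRange_one 1]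
        have t1 : (((xs.length : Int)+2) - (1+1)).toNat = xs.length := by omega
        have t2 : (((xs.length : Int)+1) - 1).toNat = xs.length := by omega
        rw [t1, t2, List.flatMap_map, List.flatMap_map]
        apply List.flatMap_congr
        intro k hk
        have hkn : k < xs.length := List.mem_range.mp hk
        try simp only [Function.comp_apply]
        rw [PySem.List.pyRange_one (1+1+(k:Int)+1), PySem.List.pyRange_one (1+(k:Int)+1)]
        have u1 : (((xs.length : Int)+2) - (1+1+(k:Int)+1)).toNat = xs.length - k - 1 := by omega
        have u2 : (((xs.length : Int)+1) - (1+(k:Int)+1)).toNat = xs.length - k - 1 := by omega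
        rw [u1, u2, List.map_map, List.map_map]
        apply List.map_congr_left
        intro m hm
        try simp only [Function.comp_apply]
        have e1 : (1+1 : Int) + (k:Int) - 1 = ((k+1 : Nat) : Int) := by push_cast; ring
        have e2 : (1+1 : Int) + (k:Int) + 1 + (m:Int) - 1 = ((k+m+2 : Nat) : Int) := by push_cast; ring
        have e3 : (1 : Int) + (k:Int) - 1 = ((k : Nat) : Int) := by ring
        have e4 : (1 : Int) + (k:Int) + 1 + (m:Int) - 1 = ((k+m+1 : Nat) : Int) := by push_cast; ring
        rw [e1, e2, e3, e4, PySem.List.pyGetD_natCast, PySem.List.pyGetD_natCast,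
            PySem.List.pyGetD_natCast, PySem.List.pyGetD_natCast]
        have e5 : k+m+2 = (k+m+1)+1 := by omega
        rw [e5]
        simp
      rw [hfirst, hrest]
      rfl

theorem pvListe2_eq_allPairs (l : List Int) : pvListe2 l = pvAllPairs l := by
  rw [pvListe2_flat, ← pvAllPairs_flat]

theorem pvGetD_take {α : Type} [Inhabited α] (xs : List α) (m : Nat) (j : Int) (d : α)
    (h0 : 0 ≤ j) (h1 : j < (m : Int)) (h2 : m ≤ xs.length) :
    PySem.List.pyGetD (xs.take m) j d = PySem.List.pyGetD xs j d := by
  rw [PySem.List.pyGetD_eq_getElem (xs.take m) d h0 (by simp; omega),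
      PySem.List.pyGetD_eq_getElem xs d h0 (by omega)]
  exact List.getElem_take

theorem pvA_eq_gen (k : Nat) (dbt : List (List Int)) (els : List Int) (en : List (List (List Int))) :
    enumDoublets (k : Int) dbt els en = en ++ pvGen k dbt els := by
  induction k generalizing dbt els en with
  | zero =>
      rw [enumDoublets]
      simp [pvGen]
  | succ k ih =>
      rw [enumDoublets]
      simp only [if_neg (by omega : ¬ ((((k+1 : Nat)) : Int) < 0)), if_pos (by omega : (((k+1 : Nat) : Int) > 0))]
      rw [PySem.Int.floordiv_natCast]
      set m := (pvListe2 els).length / (k+1) with hm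
      have hmle : m ≤ (pvListe2 els).length := Nat.div_le_self _ _
      have hcast : ((k+1 : Nat) : Int) - 1 = (k : Int) := by push_cast; ring
      rw [hcast]
      have hcong := PySem.List.foldl_congr_mem (l := PySem.List.pyRange 0 (m : Int) 1)
        (f := fun en j =>
          enumDoublets (k : Int) (dbt ++ [PySem.List.pyGetD (pvListe2 els) j []])
            ((PySem.List.remove? ((PySem.List.remove? els (PySem.List.pyGetD (PySem.List.pyGetD (pvListe2 els) j []) 0 0)).getD els) (PySem.List.pyGetD (PySem.List.pyGetD (pvListe2 els) j []) 1 0)).getD ((PySem.List.remove? els (PySem.List.pyGetD (PySem.List.pyGetD (pvListe2 els) j []) 0 0)).getD els)) en)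
        (g := fun en j =>
          en ++ pvGen k (dbt ++ [PySem.List.pyGetD ((pvListe2 els).take m) j []])
            (pvRm2 els (PySem.List.pyGetD ((pvListe2 els).take m) j [])))
        (init := en)
        (by
          intro acc j hj
          have hj' := (PySem.List.mem_pyRange_one).mp hj
          beta_reduce
          rw [← pvGetD_take (pvListe2 els) m j [] hj'.1 hj'.2 hmle]
          rw [ih]
          rfl)
      simp only [] at hcong ⊢
      rw [hcong]
      rw [show ((m : Int)) = (((pvListe2 els).take m).length : Int) by simp [List.length_take]; omega]
      rw [PySem.List.foldl_pyRange_zero_pyGetD' ((pvListe2 els).take m) []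
        (fun en p => en ++ pvGen k (dbt ++ [p]) (pvRm2 els p)) en]
      rw [PySem.List.foldl_append_eq_flatMap]
      congr 1
      simp only [pvGen, pvChilds, pvListe2_eq_allPairs, hm, List.flatMap_map]

theorem pvB_frames (k : Nat) (L : List (List (List Int) × List Int)) :
    (pvLevels (k : Int) L).map Prod.fst = L.flatMap (fun fr => pvGen k fr.1 fr.2) := by
  induction k generalizing L with
  | zero =>
      rw [pvLevels]
      simp only [if_neg (by omega : ¬ (((0 : Nat) : Int) > 0 ∧ L ≠ []))]
      simp only [pvGen]
      induction L with
      | nil => rfl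
      | cons a t iht => simp_all
  | succ k ih =>
      by_cases hL : L = []
      · subst hL
        rw [pvLevels]
        simp
      · rw [pvLevels]
        rw [if_pos ⟨by omega, hL⟩]
        have hstep :
            (L.foldl (fun nxt fr =>
              let prs := pvAllPairs fr.2
              (PySem.List.slice prs none (some (PySem.Int.floordiv (prs.length : Int) ((k+1 : Nat) : Int)))).foldl
                (fun nxt p =>
                  let rest := (PySem.List.remove? fr.2 (PySem.List.pyGetD p 0 0)).getD fr.2
                  let rest := (PySem.List.remove? rest (PySem.List.pyGetD p 1 0)).getD rest
                  nxt ++ [(fr.1 ++ [p], rest)]) nxt) [])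
            = L.flatMap (fun fr => pvChilds (k+1) fr.1 fr.2) := by
          have hbody : ∀ (nxt : List (List (List Int) × List Int)) (fr : List (List Int) × List Int),
              (let prs := pvAllPairs fr.2
               (PySem.List.slice prs none (some (PySem.Int.floordiv (prs.length : Int) ((k+1 : Nat) : Int)))).foldl
                (fun nxt p =>
                  let rest := (PySem.List.remove? fr.2 (PySem.List.pyGetD p 0 0)).getD fr.2
                  let rest := (PySem.List.remove? rest (PySem.List.pyGetD p 1 0)).getD rest
                  nxt ++ [(fr.1 ++ [p], rest)]) nxt)
              = nxt ++ pvChilds (k+1) fr.1 fr.2 := by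
            intro nxt fr
            show (PySem.List.slice (pvAllPairs fr.2) none (some (PySem.Int.floordiv ((pvAllPairs fr.2).length : Int) ((k+1 : Nat) : Int)))).foldl _ nxt = _
            rw [PySem.Int.floordiv_natCast, PySem.List.slice_to_natCast]
            rw [PySem.List.foldl_append_singleton_eq_map]
            rfl
          calc L.foldl _ ([] : List (List (List Int) × List Int))
              = L.foldl (fun nxt fr => nxt ++ pvChilds (k+1) fr.1 fr.2) [] := by
                exact PySem.List.foldl_congr_mem L _ _ [] (fun acc x _ => hbody acc x)
            _ = L.flatMap (fun fr => pvChilds (k+1) fr.1 fr.2) := by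
                rw [PySem.List.foldl_append_eq_flatMap]; rfl
        have hc : ((k+1 : Nat) : Int) - 1 = (k : Int) := by push_cast; ring
        rw [hc, hstep, ih]
        rw [List.flatMap_assoc]
        simp only [pvGen]

-- ===== VERDICT (by name: the statement is the Claim_ definition above) =====
theorem enumDoublets_spec : Claim_equal_enumDoublets := by
  intro doublet dbt elements enum _
  unfold Spec_enumDoublets
  by_cases hneg : doublet < 0
  · rw [enumDoublets, enumDoublets_alt]; simp [hneg]
  · have hk : doublet = (doublet.toNat : Int) := by omega
    rw [hk, pvA_eq_gen, enumDoublets_alt]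
    simp only [if_neg (by omega : ¬ ((doublet.toNat : Int) < 0))]
    rw [PySem.List.foldl_append_singleton_eq_map, pvB_frames]
    simp [List.flatMap]
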